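-- pv_equiv track=rewrite | github.com/QuantConnect/lean-cli | lean/commands/create_project.py | _not_identifier_char
-- ===== SOURCE A (Python) =====
-- def _not_identifier_char(text):
--     problematic_char = text[-1]
--     for i in range(1, len(text)):
--         substring = text[:i]
--         if not substring.isidentifier():
--             problematic_char = substring[-1]
--             break
--     return problematic_char
-- ===== SOURCE B (Python) =====
-- def _is_start(c):
--     return ('a' <= c <= 'z') or ('A' <= c <= 'Z') or c == '_'
--
--
-- def _is_cont(c):
--     return _is_start(c) or ('0' <= c <= '9')
--
--
-- def _not_identifier_char(text):
--     # Single left-to-right pass: the first failing prefix of A's scan ends at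
--     # the first character that breaks identifier validity.
--     if not _is_start(text[0]):
--         return text[0]
--     for c in text[1:-1]:
--         if not _is_cont(c):
--             return c
--     return text[-1]
-- ===== Notes on version B (the rewrite author's own statement) =====
-- stated objective: faster
-- what changed: Replaced the loop that rebuilds and re-validates every prefix with str.isidentifier by a single pass testing each character's identifier-start/continue validity directly.
import Mathlib
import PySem

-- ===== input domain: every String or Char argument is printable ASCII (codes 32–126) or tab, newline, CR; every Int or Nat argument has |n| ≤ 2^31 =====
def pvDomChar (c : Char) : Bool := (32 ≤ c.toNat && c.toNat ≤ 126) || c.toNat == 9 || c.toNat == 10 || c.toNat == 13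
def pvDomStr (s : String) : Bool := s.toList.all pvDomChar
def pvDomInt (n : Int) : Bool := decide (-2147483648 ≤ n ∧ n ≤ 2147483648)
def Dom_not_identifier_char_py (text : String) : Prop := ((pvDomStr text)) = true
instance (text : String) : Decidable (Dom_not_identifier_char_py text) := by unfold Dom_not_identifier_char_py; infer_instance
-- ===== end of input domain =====

-- B replaces A's quadratic rebuild-and-revalidate of every prefix by one linear
-- character scan (objective: faster, asymptotic).

-- ===== PORT A =====
-- ASCII identifier-start / identifier-continue character tests (exact on the
-- printable-ASCII domain; Python keywords are NOT excluded by str.isidentifier).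
def pvIsStart (c : Char) : Bool :=
  (97 ≤ c.toNat && c.toNat ≤ 122) || (65 ≤ c.toNat && c.toNat ≤ 90) || c.toNat == 95

def pvIsCont (c : Char) : Bool :=
  pvIsStart c || (48 ≤ c.toNat && c.toNat ≤ 57)

-- hand port of str.isidentifier (no PySem primitive); exact on ASCII strings
def pvIsIdent (cs : List Char) : Bool :=
  match cs with
  | [] => false
  | c :: r => pvIsStart c && r.all pvIsCont

-- A's for-loop with break, over the remaining indices; `sub[-1]` via pyGet?
-- (sub is nonempty for every i ≥ 1, so the `.getD pc` default is never used).
def pvLoopA (cs : List Char) (pc : Char) : List Int → Char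
  | [] => pc
  | i :: rest =>
      let sub := PySem.List.slice cs none (some i)
      if ¬ pvIsIdent sub then (PySem.List.pyGet? sub (-1)).getD pc
      else pvLoopA cs pc rest

def not_identifier_char_py (text : String) : String :=
  -- `text[-1]`: none = IndexError on empty text (excluded by Pre_), else the loop runs
  (PySem.List.pyGet? text.toList (-1)).elim ""
    (fun pc => String.ofList [pvLoopA text.toList pc (PySem.List.pyRange 1 text.toList.length 1)])

-- ===== PORT B =====
-- B's `for c in text[1:-1]` (text[1:-1] of c0::rest is rest.dropLast) with early return
def pvFindBad : List Char → Option Char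
  | [] => none
  | c :: r => if ¬ pvIsCont c then some c else pvFindBad r

def not_identifier_char_py_alt (text : String) : String :=
  match text.toList with
  | [] => ""   -- empty text: Python raises IndexError here (excluded by Pre_)
  | c0 :: rest =>
    if ¬ pvIsStart c0 then String.ofList [c0]
    else
      match pvFindBad rest.dropLast with
      | some c => String.ofList [c]
      | none => String.ofList [rest.getLastD c0]

-- ===== PRECONDITION & SPEC =====
-- Pre_ excludes only the empty string, on which both Pythons raise IndexError.
def Pre_not_identifier_char_py (text : String) : Prop := text ≠ ""
instance (text : String) : Decidable (Pre_not_identifier_char_py text) := by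
  unfold Pre_not_identifier_char_py; infer_instance
def pvWitness_not_identifier_char_py : String := "a?b"

def Spec_not_identifier_char_py (text : String) (out : String) : Prop := out = not_identifier_char_py_alt text
instance (text : String) (out : String) : Decidable (Spec_not_identifier_char_py text out) := by unfold Spec_not_identifier_char_py; infer_instance

-- ===== CLAIM (what is proved, stated in full; the proofs are below) =====
def Claim_equal_not_identifier_char_py : Prop := ∀ (text : String), Dom_not_identifier_char_py text → Pre_not_identifier_char_py text → Spec_not_identifier_char_py text (not_identifier_char_py text)

-- ===== LEMMAS AND PROOFS =====

theorem pvIsIdent_append_singleton (g : List Char) (c : Char) (hg : g ≠ []) :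
    pvIsIdent (g ++ [c]) = (pvIsIdent g && pvIsCont c) := by
  cases g with
  | nil => simp at hg
  | cons a t => simp [pvIsIdent, List.all_append, Bool.and_assoc]

theorem pvLoopA_main (r : List Char) : ∀ (g : List Char) (pc : Char), g ≠ [] →
    pvIsIdent g = true →
    pvLoopA (g ++ r) pc (PySem.List.pyRange ((g.length : Int) + 1) ((g ++ r).length : Int) 1) =
      (match pvFindBad r.dropLast with | some c => c | none => pc) := by
  induction r with
  | nil =>
    intro g pc hg hid
    simp [pvLoopA, pvFindBad]
  | cons c r' ih =>
    intro g pc hg hid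
    cases r' with
    | nil =>
      simp [pvLoopA, pvFindBad]
    | cons d r'' =>
      have hlen : ((g.length : Int) + 1) < ((g ++ c :: d :: r'').length : Int) := by
        simp
      rw [PySem.List.pyRange_one_cons hlen]
      have hsub : PySem.List.slice (g ++ c :: d :: r'') none (some ((g.length : Int) + 1))
          = g ++ [c] := by
        have : ((g.length : Int) + 1) = ((g.length + 1 : Nat) : Int) := by push_cast; ring
        rw [this, PySem.List.slice_to_natCast]
        simp [List.take_append]
      by_cases hc : pvIsCont c
      · have hid' : pvIsIdent (g ++ [c]) = true := by
          rw [pvIsIdent_append_singleton g c hg]; simp [hid, hc]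
        have step : pvLoopA (g ++ c :: d :: r'') pc
            ((((g.length : Int) + 1)) :: PySem.List.pyRange ((g.length : Int) + 1 + 1) ((g ++ c :: d :: r'').length : Int) 1)
            = pvLoopA (g ++ c :: d :: r'') pc
              (PySem.List.pyRange ((g.length : Int) + 1 + 1) ((g ++ c :: d :: r'').length : Int) 1) := by
          simp [pvLoopA, hsub, hid']
        rw [step]
        have hre : g ++ c :: d :: r'' = (g ++ [c]) ++ (d :: r'') := by simp
        have hlen2 : ((g.length : Int) + 1 + 1) = (((g ++ [c]).length : Int) + 1) := by
          simp
        rw [hre, hlen2, ih (g ++ [c]) pc (by simp) hid']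
        simp [pvFindBad, hc]
      · have hid' : pvIsIdent (g ++ [c]) = false := by
          rw [pvIsIdent_append_singleton g c hg]; simp [hc]
        have : pvLoopA (g ++ c :: d :: r'') pc
            ((((g.length : Int) + 1)) :: PySem.List.pyRange ((g.length : Int) + 1 + 1) ((g ++ c :: d :: r'').length : Int) 1)
            = (PySem.List.pyGet? (g ++ [c]) (-1)).getD pc := by
          simp [pvLoopA, hsub, hid']
        rw [this, PySem.List.pyGet?_neg_one]
        simp [pvFindBad, hc]

-- ===== VERDICT (by name: the statement is the Claim_ definition above) =====
theorem not_identifier_char_py_spec : Claim_equal_not_identifier_char_py := by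
  intro text _ hpre
  unfold Spec_not_identifier_char_py
  have hne : text.toList ≠ [] := fun h => hpre (String.toList_inj.mp (by rw [h]; rfl))
  obtain ⟨c0, rest, hcs⟩ : ∃ c0 rest, text.toList = c0 :: rest := by
    cases h : text.toList with
    | nil => exact absurd h hne
    | cons a l => exact ⟨a, l, rfl⟩
  unfold not_identifier_char_py not_identifier_char_py_alt
  rw [hcs]
  have hlast : PySem.List.pyGet? (c0 :: rest) (-1) = some (rest.getLastD c0) := by
    rw [PySem.List.pyGet?_neg_one, List.getLast?_cons]
    simp [List.getLastD_eq_getLast?]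
  rw [hlast, Option.elim_some]
  by_cases hs : pvIsStart c0
  · -- first prefix [c0] is an identifier; peel i = 1 then apply the loop lemma
    cases rest with
    | nil => simp [pvLoopA, hs, pvFindBad]
    | cons d r'' =>
      have hlen : (1 : Int) < ((c0 :: d :: r'').length : Int) := by simp
      have hrange : PySem.List.pyRange 1 ((c0 :: d :: r'').length : Int) 1
          = (1 : Int) :: PySem.List.pyRange 2 ((c0 :: d :: r'').length : Int) 1 := by
        rw [PySem.List.pyRange_one_cons hlen]; norm_num
      have hsub1 : PySem.List.slice (c0 :: d :: r'') none (some (1 : Int)) = [c0] := by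
        have : (1 : Int) = ((1 : Nat) : Int) := by norm_num
        rw [this, PySem.List.slice_to_natCast]; simp
      have hid1 : pvIsIdent [c0] = true := by simp [pvIsIdent, hs]
      have step : pvLoopA (c0 :: d :: r'') ((d :: r'').getLastD c0)
            (PySem.List.pyRange 1 ((c0 :: d :: r'').length : Int) 1)
          = pvLoopA (c0 :: d :: r'') ((d :: r'').getLastD c0)
            (PySem.List.pyRange 2 ((c0 :: d :: r'').length : Int) 1) := by
        rw [hrange]; simp [pvLoopA, hsub1, hid1]
      rw [step]
      have hre : (c0 :: d :: r'' : List Char) = [c0] ++ (d :: r'') := by simp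
      have h2 : (2 : Int) = (([c0] : List Char).length : Int) + 1 := by simp
      rw [hre, h2, pvLoopA_main (d :: r'') [c0] ((d :: r'').getLastD c0) (by simp) hid1]
      cases hfb : pvFindBad (d :: r'').dropLast with
      | some c => simp [hfb, hs]
      | none => simp [hfb, hs]
  · -- first prefix fails already
    cases rest with
    | nil => simp [pvLoopA, hs]
    | cons d r'' =>
      have hlen : (1 : Int) < ((c0 :: d :: r'').length : Int) := by simp
      have hrange : PySem.List.pyRange 1 ((c0 :: d :: r'').length : Int) 1
          = (1 : Int) :: PySem.List.pyRange 2 ((c0 :: d :: r'').length : Int) 1 := by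
        rw [PySem.List.pyRange_one_cons hlen]; norm_num
      have hsub1 : PySem.List.slice (c0 :: d :: r'') none (some (1 : Int)) = [c0] := by
        have : (1 : Int) = ((1 : Nat) : Int) := by norm_num
        rw [this, PySem.List.slice_to_natCast]; simp
      have hid1 : pvIsIdent [c0] = false := by simp [pvIsIdent, hs]
      rw [hrange]
      simp [pvLoopA, hsub1, hid1, hs, PySem.List.pyGet?_neg_one]
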